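-- pv_equiv track=rewrite | github.com/Rachelcoll/cs61a_fall-2020 | hog/hog.py | free_bacon
-- ===== SOURCE A (Python) =====
-- FIRST_101_DIGITS_OF_PI = 31415926535897932384626433832795028841971693993751058209749445923078164062862089986280348253421170679
--
-- def free_bacon(score):#n为对面分数，k为对面分数n对应的pi小数点后第n位的值
--     #返回玩家不投色子可以获得的分数
--     """Return the points scored from rolling 0 dice (Free Bacon).
--
--     score:  The opponent's current score.
--     """
--     assert score < 100, 'The game should be over.'
--     pi = FIRST_101_DIGITS_OF_PI
--
--     # Trim pi to only (score + 1) digit(s)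
--     # BEGIN PROBLEM 2
--     inverse_score = 100 - score
--     k = 0
--     while k < inverse_score:
--         pi, k = pi//10, k+1
--         #score: 1 total:101 left:2 trim: 99times
--     # END PROBLEM 2
--
--     return pi % 10 + 3
-- ===== SOURCE B (Python) =====
-- FIRST_101_DIGITS_OF_PI = 31415926535897932384626433832795028841971693993751058209749445923078164062862089986280348253421170679
--
-- def free_bacon(score):
--     """Return the points scored from rolling 0 dice (Free Bacon)."""
--     assert score < 100, 'The game should be over.'
--     return FIRST_101_DIGITS_OF_PI // 10 ** (100 - score) % 10 + 3
-- ===== Notes on version B (the rewrite author's own statement) =====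
-- stated objective: simpler
-- what changed: Replaces the while loop that trims pi one digit at a time with a single closed-form power-and-division expression pi // 10**(100-score) % 10 + 3.
import Mathlib
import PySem

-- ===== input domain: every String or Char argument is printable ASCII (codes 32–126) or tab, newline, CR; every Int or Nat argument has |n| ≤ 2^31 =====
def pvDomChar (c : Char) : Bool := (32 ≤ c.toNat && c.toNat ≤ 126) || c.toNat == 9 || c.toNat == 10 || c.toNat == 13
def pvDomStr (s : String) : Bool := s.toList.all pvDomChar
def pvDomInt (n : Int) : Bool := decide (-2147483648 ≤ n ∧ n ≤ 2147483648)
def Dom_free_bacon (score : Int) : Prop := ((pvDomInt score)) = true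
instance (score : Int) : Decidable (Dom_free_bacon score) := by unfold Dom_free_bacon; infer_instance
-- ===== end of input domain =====

-- B replaces A's digit-trimming while loop with one closed-form power-and-division expression (simpler, same values).


-- ===== PORT A =====
def pvPi : Int := 31415926535897932384626433832795028841971693993751058209749445923078164062862089986280348253421170679

-- while k < inverse_score: pi, k = pi // 10, k + 1
def freeBaconLoop (pi : Int) (k : Int) (inv : Int) : Int :=
  if k < inv then freeBaconLoop (PySem.Int.floordiv pi 10) (k + 1) inv else pi
termination_by (inv - k).toNat
decreasing_by omega

def free_bacon (score : Int) : Int :=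
  PySem.Int.mod (freeBaconLoop pvPi 0 (100 - score)) 10 + 3

-- ===== PORT B =====
def free_bacon_alt (score : Int) : Int :=
  PySem.Int.mod (PySem.Int.floordiv pvPi (10 ^ (100 - score).toNat)) 10 + 3

-- ===== PRECONDITION & SPEC =====
-- A's assert raises AssertionError for score ≥ 100; exactly those inputs are excluded.
def Pre_free_bacon (score : Int) : Prop := score < 100
instance (score : Int) : Decidable (Pre_free_bacon score) := by unfold Pre_free_bacon; infer_instance

def pvWitness_free_bacon : Int := (50)

def Spec_free_bacon (score : Int) (out : Int) : Prop := out = free_bacon_alt score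
instance (score : Int) (out : Int) : Decidable (Spec_free_bacon score out) := by unfold Spec_free_bacon; infer_instance

-- ===== CLAIM (what is proved, stated in full; the proofs are below) =====
def Claim_equal_free_bacon : Prop := ∀ (score : Int), Dom_free_bacon score → Pre_free_bacon score → Spec_free_bacon score (free_bacon score)

-- ===== LEMMAS AND PROOFS =====

theorem freeBaconLoop_eq (n : Nat) : ∀ (pi k inv : Int), (inv - k).toNat = n →
    freeBaconLoop pi k inv = PySem.Int.floordiv pi (10 ^ n) := by
  induction n with
  | zero =>
    intro pi k inv h
    rw [freeBaconLoop]
    have : ¬ k < inv := by omega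
    simp [this, pow_zero]
  | succ n ih =>
    intro pi k inv h
    rw [freeBaconLoop]
    have hk : k < inv := by omega
    simp only [hk, if_true]
    rw [ih (PySem.Int.floordiv pi 10) (k + 1) inv (by omega)]
    rw [PySem.Int.floordiv_eq_ediv_of_pos (by norm_num : (0:Int) < 10),
        PySem.Int.floordiv_eq_ediv_of_pos (by positivity : (0:Int) < 10 ^ n),
        PySem.Int.floordiv_eq_ediv_of_pos (by positivity : (0:Int) < 10 ^ (n + 1))]
    rw [Int.ediv_ediv_of_nonneg (by norm_num : (0:Int) ≤ 10)]
    ring_nf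

-- ===== VERDICT (by name: the statement is the Claim_ definition above) =====
theorem free_bacon_spec : Claim_equal_free_bacon := by
  intro score _ _
  unfold Spec_free_bacon free_bacon free_bacon_alt
  rw [freeBaconLoop_eq ((100 - score).toNat) pvPi 0 (100 - score) (by omega)]
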